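-- pv_equiv track=rewrite | github.com/virenderox/DSA_PROBLEM_SHEET_450 | Array/PROB - 4/Kth smallest element/main.py | arrStore
-- ===== SOURCE A (Python) =====
-- def arrStore(lst):
--     l = []
--     min = float('inf')
--     for i in lst:
--         if i < min:
--             min = i
--             l.append(min)
--     return l
-- ===== SOURCE B (Python) =====
-- def _prefix_mins(lst):
--     mins = []
--     cur = None
--     for x in lst:
--         cur = x if cur is None else min(cur, x)
--         mins.append(cur)
--     return mins
--
--
-- def arrStore(lst):
--     mins = _prefix_mins(lst)
--     if not mins:
--         return []
--     return [mins[0]] + [b for a, b in zip(mins, mins[1:]) if b < a]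
-- ===== Notes on version B (the rewrite author's own statement) =====
-- stated objective: alternative
-- what changed: B first materializes the full running-minimum table in one pass, then in a second pass extracts the strict drops (first element plus every prefix-min strictly below its predecessor), instead of appending records on the fly inside a single loop.
import Mathlib
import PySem

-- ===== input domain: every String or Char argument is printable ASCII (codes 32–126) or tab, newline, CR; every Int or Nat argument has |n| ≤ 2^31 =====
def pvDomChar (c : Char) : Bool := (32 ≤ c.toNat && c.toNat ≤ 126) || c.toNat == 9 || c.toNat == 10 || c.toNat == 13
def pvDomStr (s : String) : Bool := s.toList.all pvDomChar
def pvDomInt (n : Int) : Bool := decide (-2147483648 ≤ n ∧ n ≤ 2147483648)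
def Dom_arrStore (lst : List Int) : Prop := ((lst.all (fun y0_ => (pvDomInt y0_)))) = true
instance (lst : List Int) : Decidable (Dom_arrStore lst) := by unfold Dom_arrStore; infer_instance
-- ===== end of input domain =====

-- B materializes the running-minimum table first, then extracts its strict drops in a second pass;
-- A appends records on the fly in one loop.  Same O(n) cost, different decomposition.

-- ===== PORT A =====
-- state: (current minimum, none = float('inf'); accumulated list l)
def arrStore (lst : List Int) : List Int :=
  (lst.foldl (fun (s : Option Int × List Int) i =>
      match s.1 with
      | none => (some i, s.2 ++ [i])
      | some m => if i < m then (some i, s.2 ++ [i]) else s)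
    (none, [])).2

-- ===== PORT B =====
-- _prefix_mins: cur = None sentinel, append running minimum at each step
def prefixMinsB (lst : List Int) : List Int :=
  (lst.foldl (fun (s : Option Int × List Int) x =>
      let cur : Int := match s.1 with | none => x | some c => min c x
      (some cur, s.2 ++ [cur]))
    (none, [])).2

def arrStore_alt (lst : List Int) : List Int :=
  let mins := prefixMinsB lst
  match mins with
  | [] => []
  | m0 :: rest =>
    m0 :: ((mins.zip rest).filterMap (fun p => if p.2 < p.1 then some p.2 else none))

-- ===== PRECONDITION & SPEC =====
def Spec_arrStore (lst : List Int) (out : List Int) : Prop := out = arrStore_alt lst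
instance (lst : List Int) (out : List Int) : Decidable (Spec_arrStore lst out) := by unfold Spec_arrStore; infer_instance

-- ===== CLAIM (what is proved, stated in full; the proofs are below) =====
def Claim_equal_arrStore : Prop := ∀ (lst : List Int), Dom_arrStore lst → Spec_arrStore lst (arrStore lst)

-- ===== LEMMAS AND PROOFS =====

-- the strict-drop records of xs below a current minimum m
def recs (m : Int) : List Int → List Int
  | [] => []
  | x :: xs => if x < m then x :: recs x xs else recs m xs

-- running minima of xs with current minimum m
def pm (m : Int) : List Int → List Int
  | [] => []
  | x :: xs => min m x :: pm (min m x) xs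

theorem foldA_some (xs : List Int) : ∀ (m : Int) (acc : List Int),
    (xs.foldl (fun (s : Option Int × List Int) i =>
        match s.1 with
        | none => (some i, s.2 ++ [i])
        | some m => if i < m then (some i, s.2 ++ [i]) else s)
      (some m, acc)).2 = acc ++ recs m xs := by
  induction xs with
  | nil => intro m acc; simp [recs]
  | cons x xs ih =>
    intro m acc
    by_cases h : x < m
    · simp [List.foldl, h, recs, ih]
    · simp [List.foldl, h, recs, ih]

theorem foldB_some (xs : List Int) : ∀ (m : Int) (acc : List Int),
    (xs.foldl (fun (s : Option Int × List Int) x =>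
        let cur : Int := match s.1 with | none => x | some c => min c x
        (some cur, s.2 ++ [cur]))
      (some m, acc)).2 = acc ++ pm m xs := by
  induction xs with
  | nil => intro m acc; simp [pm]
  | cons x xs ih =>
    intro m acc
    simp [List.foldl, pm, ih]

theorem zip_filter_pm (xs : List Int) : ∀ (m : Int),
    ((m :: pm m xs).zip (pm m xs)).filterMap
        (fun p : Int × Int => if p.2 < p.1 then some p.2 else none)
      = recs m xs := by
  induction xs with
  | nil => intro m; simp [pm, recs]
  | cons x xs ih =>
    intro m
    by_cases h : x < m
    · have hm : min m x = x := by omega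
      simp only [pm, recs, hm, h, if_true, List.zip_cons_cons, List.filterMap_cons]
      simpa [List.zip, h] using ih x
    · have hm : min m x = m := by omega
      simp only [pm, recs, hm, h, if_false, List.zip_cons_cons, List.filterMap_cons]
      simpa [List.zip, h] using ih m

-- ===== VERDICT (by name: the statement is the Claim_ definition above) =====
theorem arrStore_spec : Claim_equal_arrStore := by
  intro lst _
  unfold Spec_arrStore
  cases lst with
  | nil => rfl
  | cons x xs =>
    have hA : arrStore (x :: xs) = x :: recs x xs := by
      simpa [arrStore, List.foldl] using foldA_some xs x [x]
    have hpm : prefixMinsB (x :: xs) = x :: pm x xs := by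
      simpa [prefixMinsB, List.foldl] using foldB_some xs x [x]
    have hB : arrStore_alt (x :: xs) = x :: recs x xs := by
      rw [arrStore_alt]
      simp only [hpm]
      rw [zip_filter_pm]
    rw [hA, hB]
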